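-- pv_equiv track=rewrite | github.com/ec0k1ng/smart_analyzer | src/tcs_smart_analyzer/config/editable_configs.py | _rename_identifier_references_in_python_config
-- ===== SOURCE A (Python) =====
-- def _rename_identifier_references_in_python_config(content: str, old_name: str, new_name: str) -> str:
--     if not old_name or not new_name or old_name == new_name:
--         return content
--
--     old_token = f'"{old_name}"'
--     new_token = f'"{new_name}"'
--     updated_lines: list[str] = []
--     inside_derived_inputs = False
--     bracket_balance = 0
--
--     for line in content.splitlines(keepends=True):
--         updated_line = line
--
--         if inside_derived_inputs or '"derived_inputs"' in updated_line:
--             updated_line = updated_line.replace(old_token, new_token)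
--             bracket_balance += updated_line.count("[") - updated_line.count("]")
--             inside_derived_inputs = bracket_balance > 0
--             if not inside_derived_inputs:
--                 bracket_balance = 0
--
--         updated_lines.append(updated_line)
--
--     return "".join(updated_lines)
-- ===== SOURCE B (Python) =====
-- def _rename_identifier_references_in_python_config(content: str, old_name: str, new_name: str) -> str:
--     if not old_name or not new_name or old_name == new_name:
--         return content
--
--     old_token = f'"{old_name}"'
--     new_token = f'"{new_name}"'
--     lines = content.splitlines(keepends=True)
--
--     out = []
--     i = 0
--     while i < len(lines):
--         line = lines[i]
--         i += 1
--         if '"derived_inputs"' not in line: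
--             out.append(line)
--             continue
--         # Found a derived_inputs header: rewrite this line, then keep rewriting
--         # following lines until the block's brackets are balanced again.
--         rewritten = line.replace(old_token, new_token)
--         out.append(rewritten)
--         balance = rewritten.count("[") - rewritten.count("]")
--         while balance > 0 and i < len(lines):
--             rewritten = lines[i].replace(old_token, new_token)
--             i += 1
--             out.append(rewritten)
--             balance += rewritten.count("[") - rewritten.count("]")
--     return "".join(out)
-- ===== Notes on version B (the rewrite author's own statement) =====
-- stated objective: alternative
-- what changed: B replaces A's single line loop carrying an inside flag and a bracket-balance state that must be reset with a block-structured nested loop: an outer loop copies lines until one contains the derived_inputs key, then an inner loop rewrites lines and accumulates the block's bracket balance until it closes; no flag and no state reset exist.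
import Mathlib
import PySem

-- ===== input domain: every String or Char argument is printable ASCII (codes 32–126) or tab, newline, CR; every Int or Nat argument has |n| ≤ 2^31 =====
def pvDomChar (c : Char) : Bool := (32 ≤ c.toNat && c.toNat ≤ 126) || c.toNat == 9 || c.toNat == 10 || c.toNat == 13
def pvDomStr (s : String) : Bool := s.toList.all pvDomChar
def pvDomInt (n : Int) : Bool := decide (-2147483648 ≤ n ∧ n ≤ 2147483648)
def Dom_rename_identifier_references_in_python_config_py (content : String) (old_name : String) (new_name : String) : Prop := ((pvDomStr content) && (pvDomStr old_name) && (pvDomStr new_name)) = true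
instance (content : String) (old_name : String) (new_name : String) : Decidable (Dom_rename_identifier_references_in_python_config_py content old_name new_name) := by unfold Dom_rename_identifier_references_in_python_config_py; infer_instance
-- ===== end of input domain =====

-- B restructures A's flag-and-reset line loop as a block-structured nested loop (copy lines
-- until a derived_inputs header, then rewrite lines until the block's brackets close) —
-- objective: alternative decomposition, same asymptotic cost.


-- ===== PORT A =====
-- content.splitlines(keepends=True): hand-ported (PySem.Str.splitlines drops the line endings);
-- exact on the Dom (the only line breaks in Dom are '\n', '\r' and '\r\n').
def pvSplitKeepGo (acc : List Char) : List Char → List (List Char)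
  | [] => if acc = [] then [] else [acc.reverse]
  | '\r' :: '\n' :: rest => (acc.reverse ++ ['\r', '\n']) :: pvSplitKeepGo [] rest
  | '\n' :: rest => (acc.reverse ++ ['\n']) :: pvSplitKeepGo [] rest
  | '\r' :: rest => (acc.reverse ++ ['\r']) :: pvSplitKeepGo [] rest
  | c :: rest => pvSplitKeepGo (c :: acc) rest

def pvSplitKeep (s : List Char) : List (List Char) := pvSplitKeepGo [] s

-- the loop of A: per line, replace + count brackets of the replaced line, update inside/balance
def pvALoop (oldTok newTok : List Char) : List (List Char) → Bool → Int → List (List Char)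
  | [], _, _ => []
  | line :: rest, inside, bal =>
    if inside || PySem.Chars.isIn "\"derived_inputs\"".toList line then
      let u := PySem.Chars.replace line oldTok newTok
      let bal' : Int := bal + (PySem.Chars.count u ['['] : Int) - (PySem.Chars.count u [']'] : Int)
      let inside' : Bool := bal' > 0
      u :: pvALoop oldTok newTok rest inside' (if inside' then bal' else 0)
    else
      line :: pvALoop oldTok newTok rest inside bal

def rename_identifier_references_in_python_config_py (content : String) (old_name : String) (new_name : String) : String :=
  if old_name = "" ∨ new_name = "" ∨ old_name = new_name then content
  else
    let oldTok := '"' :: old_name.toList ++ ['"']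
    let newTok := '"' :: new_name.toList ++ ['"']
    String.ofList (pvALoop oldTok newTok (pvSplitKeep content.toList) false 0).flatten

-- ===== PORT B =====
-- inner loop of B: rewrite lines of an open block while its bracket balance stays positive;
-- returns (rewritten block lines, remaining lines)
def pvBInner (oldTok newTok : List Char) : List (List Char) → Int → List (List Char) × List (List Char)
  | [], _ => ([], [])
  | line :: rest, bal =>
    let u := PySem.Chars.replace line oldTok newTok
    let bal' : Int := bal + (PySem.Chars.count u ['['] : Int) - (PySem.Chars.count u [']'] : Int)
    if bal' > 0 then
      let p := pvBInner oldTok newTok rest bal'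
      (u :: p.1, p.2)
    else
      ([u], rest)

-- termination of the outer loop: the inner loop only consumes lines
theorem pvBInner_snd_length_le (oldTok newTok : List Char) :
    ∀ (l : List (List Char)) (bal : Int),
    (pvBInner oldTok newTok l bal).2.length ≤ l.length := by
  intro l
  induction l with
  | nil => intro bal; simp [pvBInner]
  | cons line rest ih =>
    intro bal
    rw [pvBInner]
    split
    · exact Nat.le_succ_of_le (ih _)
    · simp

-- outer loop of B: copy lines until a derived_inputs header, then process the block
def pvBOuter (oldTok newTok : List Char) : List (List Char) → List (List Char)
  | [] => []
  | line :: rest =>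
    if PySem.Chars.isIn "\"derived_inputs\"".toList line then
      let u := PySem.Chars.replace line oldTok newTok
      let bal : Int := (PySem.Chars.count u ['['] : Int) - (PySem.Chars.count u [']'] : Int)
      if bal > 0 then
        let p := pvBInner oldTok newTok rest bal
        u :: (p.1 ++ pvBOuter oldTok newTok p.2)
      else
        u :: pvBOuter oldTok newTok rest
    else
      line :: pvBOuter oldTok newTok rest
  termination_by l => l.length
  decreasing_by
  · exact Nat.lt_succ_of_le (pvBInner_snd_length_le oldTok newTok rest bal)
  · simp
  · simp

def rename_identifier_references_in_python_config_py_alt (content : String) (old_name : String) (new_name : String) : String :=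
  if old_name = "" ∨ new_name = "" ∨ old_name = new_name then content
  else
    let oldTok := '"' :: old_name.toList ++ ['"']
    let newTok := '"' :: new_name.toList ++ ['"']
    String.ofList (pvBOuter oldTok newTok (pvSplitKeep content.toList)).flatten

-- ===== PRECONDITION & SPEC =====
def Spec_rename_identifier_references_in_python_config_py (content : String) (old_name : String) (new_name : String) (out : String) : Prop := out = rename_identifier_references_in_python_config_py_alt content old_name new_name
instance (content : String) (old_name : String) (new_name : String) (out : String) : Decidable (Spec_rename_identifier_references_in_python_config_py content old_name new_name out) := by unfold Spec_rename_identifier_references_in_python_config_py; infer_instance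

-- ===== CLAIM (what is proved, stated in full; the proofs are below) =====
def Claim_equal_rename_identifier_references_in_python_config_py : Prop := ∀ (content : String) (old_name : String) (new_name : String), Dom_rename_identifier_references_in_python_config_py content old_name new_name → Spec_rename_identifier_references_in_python_config_py content old_name new_name (rename_identifier_references_in_python_config_py content old_name new_name)

-- ===== LEMMAS AND PROOFS =====

-- A inside a block (inside = true, balance bal) is B's inner loop followed by A restarted
theorem pv_inner_eq (oldTok newTok : List Char) (lines : List (List Char)) :
    ∀ bal : Int,
    pvALoop oldTok newTok lines true bal
      = (pvBInner oldTok newTok lines bal).1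
        ++ pvALoop oldTok newTok (pvBInner oldTok newTok lines bal).2 false 0 := by
  induction lines with
  | nil => intro bal; simp [pvALoop, pvBInner]
  | cons line rest ih =>
    intro bal
    rw [pvALoop, pvBInner]
    simp only [Bool.true_or, if_true]
    by_cases hb : (bal + (PySem.Chars.count (PySem.Chars.replace line oldTok newTok) ['['] : Int)
        - (PySem.Chars.count (PySem.Chars.replace line oldTok newTok) [']'] : Int)) > 0
    · simp only [hb, decide_true, if_true, List.cons_append]
      rw [ih]
    · simp only [hb, decide_false, Bool.false_eq_true, if_false, List.cons_append,
        List.nil_append]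

-- A started fresh equals B's outer loop
theorem pv_outer_eq (oldTok newTok : List Char) :
    ∀ (n : Nat) (lines : List (List Char)), lines.length ≤ n →
    pvALoop oldTok newTok lines false 0 = pvBOuter oldTok newTok lines := by
  intro n
  induction n with
  | zero =>
    intro lines h
    have : lines = [] := List.length_eq_zero_iff.mp (Nat.le_zero.mp h)
    subst this
    simp [pvALoop, pvBOuter]
  | succ n ih =>
    intro lines h
    cases lines with
    | nil => simp [pvALoop, pvBOuter]
    | cons line rest =>
      rw [pvALoop, pvBOuter]
      have hlen : rest.length ≤ n := by simpa using h
      by_cases hm : PySem.Chars.isIn "\"derived_inputs\"".toList line = true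
      · simp only [hm, Bool.false_or, if_true]
        have hz : (0 : Int) + (PySem.Chars.count (PySem.Chars.replace line oldTok newTok) ['['] : Int)
            - (PySem.Chars.count (PySem.Chars.replace line oldTok newTok) [']'] : Int)
          = (PySem.Chars.count (PySem.Chars.replace line oldTok newTok) ['['] : Int)
            - (PySem.Chars.count (PySem.Chars.replace line oldTok newTok) [']'] : Int) := by ring
        rw [hz]
        by_cases hb : ((PySem.Chars.count (PySem.Chars.replace line oldTok newTok) ['['] : Int)
            - (PySem.Chars.count (PySem.Chars.replace line oldTok newTok) [']'] : Int)) > 0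
        · simp only [hb, decide_true, if_true]
          rw [pv_inner_eq]
          rw [ih _ (le_trans (pvBInner_snd_length_le oldTok newTok rest _) hlen)]
        · simp only [hb, decide_false, Bool.false_eq_true, if_false]
          rw [ih rest hlen]
      · simp only [hm, Bool.false_or, Bool.false_eq_true, if_false]
        rw [ih rest hlen]

-- ===== VERDICT (by name: the statement is the Claim_ definition above) =====
theorem rename_identifier_references_in_python_config_py_spec : Claim_equal_rename_identifier_references_in_python_config_py := by
  intro content old_name new_name _
  unfold Spec_rename_identifier_references_in_python_config_py
  unfold rename_identifier_references_in_python_config_py rename_identifier_references_in_python_config_py_alt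
  by_cases hg : old_name = "" ∨ new_name = "" ∨ old_name = new_name
  · rw [if_pos hg, if_pos hg]
  · rw [if_neg hg, if_neg hg]
    exact congrArg (fun l => String.ofList l.flatten)
      (pv_outer_eq ('"' :: old_name.toList ++ ['"']) ('"' :: new_name.toList ++ ['"'])
        (pvSplitKeep content.toList).length (pvSplitKeep content.toList) le_rfl)
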